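-- pv_equiv track=rewrite | github.com/MengShow2025/0buck2026 | backend/app/services/shopify_refunds.py | _pick_success_sale_transaction
-- ===== SOURCE A (Python) =====
-- from typing import Any, Dict, List, Optional, Tuple
--
-- def _pick_success_sale_transaction(transactions: List[Dict[str, Any]]) -> Optional[Dict[str, Any]]:
--     for t in transactions:
--         if t.get("kind") == "sale" and t.get("status") == "success":
--             return t
--     for t in transactions:
--         if t.get("kind") == "sale":
--             return t
--     return None
-- ===== SOURCE B (Python) =====
-- from typing import Any, Dict, List, Optional
--
-- def _pick_success_sale_transaction(transactions: List[Dict[str, Any]]) -> Optional[Dict[str, Any]]: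
--     first_sale = None
--     for t in transactions:
--         if t.get("kind") == "sale":
--             if t.get("status") == "success":
--                 return t
--             if first_sale is None:
--                 first_sale = t
--     return first_sale
-- ===== Notes on version B (the rewrite author's own statement) =====
-- stated objective: alternative
-- what changed: Replaced A's two sequential scans (first for a success sale, then for any sale) with a single pass that returns a success sale eagerly and remembers the first sale seen as a fallback.
import Mathlib
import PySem

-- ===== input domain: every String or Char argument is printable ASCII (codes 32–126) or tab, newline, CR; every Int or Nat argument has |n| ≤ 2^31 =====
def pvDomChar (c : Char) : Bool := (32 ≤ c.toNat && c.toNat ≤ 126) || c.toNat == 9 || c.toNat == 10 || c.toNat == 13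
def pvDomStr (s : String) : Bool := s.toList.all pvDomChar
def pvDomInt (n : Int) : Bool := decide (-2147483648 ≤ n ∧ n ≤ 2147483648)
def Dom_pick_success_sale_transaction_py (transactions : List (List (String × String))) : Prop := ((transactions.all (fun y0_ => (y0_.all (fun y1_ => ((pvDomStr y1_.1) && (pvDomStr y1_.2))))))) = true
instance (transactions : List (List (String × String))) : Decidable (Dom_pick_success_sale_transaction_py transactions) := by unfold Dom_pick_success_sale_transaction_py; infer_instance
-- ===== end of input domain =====

-- B replaces A's two sequential scans with a single pass that returns a success
-- sale eagerly and keeps the first sale seen as fallback (alternative decomposition).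


-- ===== PORT A =====
-- A's first loop: return the first t with kind == "sale" and status == "success"
def pvLoopA1 : List (List (String × String)) → Option (List (String × String))
  | [] => none
  | t :: r =>
    if (PySem.Dict.get? (PySem.Dict.mk t) "kind" == some "sale") && (PySem.Dict.get? (PySem.Dict.mk t) "status" == some "success")
    then some t else pvLoopA1 r

-- A's second loop: return the first t with kind == "sale"
def pvLoopA2 : List (List (String × String)) → Option (List (String × String))
  | [] => none
  | t :: r =>
    if PySem.Dict.get? (PySem.Dict.mk t) "kind" == some "sale" then some t else pvLoopA2 r

def pick_success_sale_transaction_py (transactions : List (List (String × String))) : Option (List (String × String)) :=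
  match pvLoopA1 transactions with
  | some t => some t
  | none => pvLoopA2 transactions

-- ===== PORT B =====
-- B's single loop carrying first_sale
def pvLoopB (first_sale : Option (List (String × String))) : List (List (String × String)) → Option (List (String × String))
  | [] => first_sale
  | t :: r =>
    if PySem.Dict.get? (PySem.Dict.mk t) "kind" == some "sale" then
      if PySem.Dict.get? (PySem.Dict.mk t) "status" == some "success" then some t
      else pvLoopB (match first_sale with | none => some t | some x => some x) r
    else pvLoopB first_sale r

def pick_success_sale_transaction_py_alt (transactions : List (List (String × String))) : Option (List (String × String)) :=
  pvLoopB none transactions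

-- ===== PRECONDITION & SPEC =====
def Spec_pick_success_sale_transaction_py (transactions : List (List (String × String))) (out : Option (List (String × String))) : Prop := out = pick_success_sale_transaction_py_alt transactions
instance (transactions : List (List (String × String))) (out : Option (List (String × String))) : Decidable (Spec_pick_success_sale_transaction_py transactions out) := by unfold Spec_pick_success_sale_transaction_py; infer_instance

-- ===== CLAIM (what is proved, stated in full; the proofs are below) =====
def Claim_equal_pick_success_sale_transaction_py : Prop := ∀ (transactions : List (List (String × String))), Dom_pick_success_sale_transaction_py transactions → Spec_pick_success_sale_transaction_py transactions (pick_success_sale_transaction_py transactions)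

-- ===== LEMMAS AND PROOFS =====
theorem pvLoopB_eq (ts : List (List (String × String))) :
    ∀ fs, pvLoopB fs ts =
      match pvLoopA1 ts with
      | some t => some t
      | none => (match fs with | some x => some x | none => pvLoopA2 ts) := by
  induction ts with
  | nil => intro fs; cases fs <;> rfl
  | cons t r ih =>
    intro fs
    simp only [pvLoopB, pvLoopA1, pvLoopA2]
    by_cases hk : PySem.Dict.get? (PySem.Dict.mk t) "kind" == some "sale"
    · by_cases hs : PySem.Dict.get? (PySem.Dict.mk t) "status" == some "success"
      · simp [hk, hs]
      · simp only [hk, hs, Bool.and_false, if_true, if_false, Bool.false_eq_true]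
        rw [ih]
        cases fs <;> simp
    · simp only [hk, Bool.false_eq_true, if_false, Bool.false_and]
      rw [ih]

-- ===== VERDICT (by name: the statement is the Claim_ definition above) =====
theorem pick_success_sale_transaction_py_spec : Claim_equal_pick_success_sale_transaction_py := by
  intro ts _
  unfold Spec_pick_success_sale_transaction_py pick_success_sale_transaction_py pick_success_sale_transaction_py_alt
  rw [pvLoopB_eq]
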